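-- pv_equiv track=rewrite | github.com/stds58/shkolla | proj/appshkolle/models.py | get_raspredelenie_groups
-- ===== SOURCE A (Python) =====
-- def get_raspredelenie_groups(min, max, itogo):
--     grupi = {}
--     x = (itogo // max) + 1
--     z = max * x - itogo
--
--     if min == max and max >= itogo:
--         grupi = {1: itogo}
--     else:
--         for i in range(1, x + 1):
--             grupi[i] = max
--         while z > 0:
--             for key, value in grupi.items():
--                 if z > 0:
--                     grupi[key] = value - 1
--                     z -= 1
--     return grupi
-- ===== SOURCE B (Python) =====
-- def get_raspredelenie_groups(min, max, itogo):
--     if min == max and max >= itogo: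
--         return {1: itogo}
--     x = itogo // max + 1
--     z = max * x - itogo
--     if z <= 0:
--         return {i: max for i in range(1, x + 1)}
--     q, r = divmod(z, x)
--     return {i: max - q - (1 if i <= r else 0) for i in range(1, x + 1)}
-- ===== Notes on version B (the rewrite author's own statement) =====
-- stated objective: faster
-- what changed: Replaces the round-robin decrement loop (z decrement steps over the dict) with a closed-form divmod: full decrements q = z//x for every group and one extra for the first z%x keys.
import Mathlib
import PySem

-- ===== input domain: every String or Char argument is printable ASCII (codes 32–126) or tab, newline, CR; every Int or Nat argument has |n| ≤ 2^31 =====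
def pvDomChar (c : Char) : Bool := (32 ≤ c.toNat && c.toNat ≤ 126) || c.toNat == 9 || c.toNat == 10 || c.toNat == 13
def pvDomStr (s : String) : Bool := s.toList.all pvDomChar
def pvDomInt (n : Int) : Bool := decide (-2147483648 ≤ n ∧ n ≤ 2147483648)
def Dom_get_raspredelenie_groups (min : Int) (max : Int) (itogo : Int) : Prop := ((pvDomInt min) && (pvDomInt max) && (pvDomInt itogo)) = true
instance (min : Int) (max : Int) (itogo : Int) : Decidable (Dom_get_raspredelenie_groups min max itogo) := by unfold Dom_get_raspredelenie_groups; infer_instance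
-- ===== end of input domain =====

-- B replaces A's round-robin decrement loop (z single-decrement steps over the dict)
-- by the closed-form divmod distribution q = z // x, r = z % x; objective: faster (asymptotic).

-- ===== PORT A =====
-- dict[int,int] is an association list (insertion order); `grupi[key] = val`
-- is update-in-place for an existing key, append for a fresh one (exact: Python dict semantics).
def pvIns (g : List (Int × Int)) (k v : Int) : List (Int × Int) :=
  match g with
  | [] => [(k, v)]
  | (k', v') :: t => if k' = k then (k, v) :: t else (k', v') :: pvIns t k v

-- one step of `for key, value in grupi.items(): if z > 0: grupi[key] = value - 1; z -= 1`
def pvStep (s : List (Int × Int) × Int) (kv : Int × Int) : List (Int × Int) × Int :=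
  if 0 < s.2 then (pvIns s.1 kv.1 (kv.2 - 1), s.2 - 1) else s

-- one `for key, value in grupi.items(): …` pass; folding over the snapshot of items is
-- exact here because the loop only overwrites the value of the key it is visiting.
def pvPass (g : List (Int × Int)) (z : Int) : List (Int × Int) × Int :=
  g.foldl pvStep (g, z)

-- the `while z > 0:` loop; the `p.2.toNat < z.toNat` guard is a totality guard only
-- (Python diverges exactly when it fails, i.e. on an empty dict with z > 0).
def pvWhile (g : List (Int × Int)) (z : Int) : List (Int × Int) :=
  if h : 0 < z then
    let p := pvPass g z
    if h2 : p.2.toNat < z.toNat then pvWhile p.1 p.2 else p.1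
  else g
termination_by z.toNat
decreasing_by exact h2

def get_raspredelenie_groups (min : Int) (max : Int) (itogo : Int) : List (Int × Int) :=
  let x := PySem.Int.floordiv itogo max + 1
  let z := max * x - itogo
  if min = max ∧ itogo ≤ max then [(1, itogo)]
  else
    let grupi := (PySem.List.pyRange 1 (x + 1) 1).foldl (fun g i => pvIns g i max) []
    pvWhile grupi z

-- ===== PORT B =====
def get_raspredelenie_groups_alt (min : Int) (max : Int) (itogo : Int) : List (Int × Int) :=
  if min = max ∧ itogo ≤ max then [(1, itogo)]
  else
    let x := PySem.Int.floordiv itogo max + 1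
    let z := max * x - itogo
    if z ≤ 0 then (PySem.List.pyRange 1 (x + 1) 1).map (fun i => (i, max))
    else
      let q := PySem.Int.floordiv z x
      let r := PySem.Int.mod z x
      (PySem.List.pyRange 1 (x + 1) 1).map (fun i => (i, max - q - (if i ≤ r then 1 else 0)))

-- ===== PRECONDITION & SPEC =====
-- Pre_ excludes exactly the inputs where A does not return: max = 0 (ZeroDivisionError)
-- and max > 0 ∧ itogo < 0 outside the special branch (the while loop runs over an empty dict forever).
def Pre_get_raspredelenie_groups (min : Int) (max : Int) (itogo : Int) : Prop :=
  max ≠ 0 ∧ (0 ≤ itogo ∨ max < 0 ∨ (min = max ∧ itogo ≤ max))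
instance (min : Int) (max : Int) (itogo : Int) : Decidable (Pre_get_raspredelenie_groups min max itogo) := by unfold Pre_get_raspredelenie_groups; infer_instance
def pvWitness_get_raspredelenie_groups : Int × Int × Int := (2, 3, 7)

def Spec_get_raspredelenie_groups (min : Int) (max : Int) (itogo : Int) (out : List (Int × Int)) : Prop := out = get_raspredelenie_groups_alt min max itogo
instance (min : Int) (max : Int) (itogo : Int) (out : List (Int × Int)) : Decidable (Spec_get_raspredelenie_groups min max itogo out) := by unfold Spec_get_raspredelenie_groups; infer_instance

-- ===== CLAIM (what is proved, stated in full; the proofs are below) =====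
def Claim_equal_get_raspredelenie_groups : Prop := ∀ (min : Int) (max : Int) (itogo : Int), Dom_get_raspredelenie_groups min max itogo → Pre_get_raspredelenie_groups min max itogo → Spec_get_raspredelenie_groups min max itogo (get_raspredelenie_groups min max itogo)
-- ===== LEMMAS AND PROOFS =====


-- pdec g z: decrement the values of the first z entries (the result of one pass of A's inner loop).
def pvDec (g : List (Int × Int)) (z : Int) : List (Int × Int) × Int :=
  match g with
  | [] => ([], z)
  | (k, v) :: t =>
    if 0 < z then
      let r := pvDec t (z - 1)
      ((k, v - 1) :: r.1, r.2)
    else ((k, v) :: t, z)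

theorem pvIns_fresh (g : List (Int × Int)) (k v : Int) (h : k ∉ g.map Prod.fst) :
    pvIns g k v = g ++ [(k, v)] := by
  induction g with
  | nil => rfl
  | cons p t ih =>
    obtain ⟨k', v'⟩ := p
    simp only [List.map_cons, List.mem_cons] at h
    push_neg at h
    simp [pvIns, Ne.symm h.1, ih h.2]

theorem pvIns_mid (A t : List (Int × Int)) (k v w : Int) (h : k ∉ A.map Prod.fst) :
    pvIns (A ++ (k, v) :: t) k w = A ++ (k, w) :: t := by
  induction A with
  | nil => simp [pvIns]
  | cons p s ih =>
    obtain ⟨k', v'⟩ := p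
    simp only [List.map_cons, List.mem_cons] at h
    push_neg at h
    simp [pvIns, Ne.symm h.1, ih h.2]

theorem pv_build (l : List Int) (c : Int) : ∀ (acc : List (Int × Int)),
    (∀ k ∈ l, k ∉ acc.map Prod.fst) → l.Nodup →
    l.foldl (fun g i => pvIns g i c) acc = acc ++ l.map (fun i => (i, c)) := by
  induction l with
  | nil => intro acc _ _; simp
  | cons a t ih =>
    intro acc hfresh hnd
    simp only [List.foldl_cons]
    rw [pvIns_fresh acc a c (hfresh a (by simp)), ih (acc ++ [(a, c)])]
    · simp
    · intro k hk
      simp only [List.map_append, List.mem_append, List.map_cons]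
      rintro (h | h)
      · exact hfresh k (by simp [hk]) h
      · simp only [List.map_cons, List.map_nil, List.mem_singleton] at h
        exact (List.nodup_cons.mp hnd).1 (h ▸ hk)
    · exact (List.nodup_cons.mp hnd).2

theorem pv_foldl_frozen (B : List (Int × Int)) (acc : List (Int × Int)) (z : Int) (hz : ¬ 0 < z) :
    B.foldl pvStep (acc, z) = (acc, z) := by
  induction B generalizing acc with
  | nil => rfl
  | cons p t ih => simp only [List.foldl_cons, pvStep, if_neg hz]; exact ih acc

theorem pv_foldl_pvStep (B : List (Int × Int)) : ∀ (A : List (Int × Int)) (z : Int),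
    (∀ k ∈ B.map Prod.fst, k ∉ A.map Prod.fst) → (B.map Prod.fst).Nodup →
    B.foldl pvStep (A ++ B, z) = (A ++ (pvDec B z).1, (pvDec B z).2) := by
  induction B with
  | nil => intro A z _ _; simp [pvDec]
  | cons p t ih =>
    obtain ⟨k, v⟩ := p
    intro A z hdisj hnd
    simp only [List.map_cons, List.nodup_cons] at hnd
    by_cases hz : 0 < z
    · simp only [List.foldl_cons, pvStep, if_pos hz]
      rw [pvIns_mid A t k v (v - 1) (hdisj k (by simp))]
      have := ih (A ++ [(k, v - 1)]) (z - 1)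
        (by
          intro k' hk'
          simp only [List.map_append, List.mem_append, List.map_cons, List.map_nil,
            List.mem_singleton]
          rintro (h | h)
          · exact hdisj k' (by simp [hk']) h
          · exact hnd.1 (h ▸ hk'))
        hnd.2
      simp only [List.append_assoc, List.singleton_append] at this
      rw [this]
      simp [pvDec, if_pos hz]
    · rw [pv_foldl_frozen _ _ _ hz]
      simp [pvDec, if_neg hz]

theorem pvPass_eq (g : List (Int × Int)) (z : Int) (hnd : (g.map Prod.fst).Nodup) :
    pvPass g z = pvDec g z := by
  have := pv_foldl_pvStep g [] z (by simp) hnd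
  simpa [pvPass] using this

theorem pvDec_nonpos (g : List (Int × Int)) (z : Int) (hz : ¬ 0 < z) : pvDec g z = (g, z) := by
  cases g with
  | nil => rfl
  | cons p t => obtain ⟨k, v⟩ := p; simp [pvDec, if_neg hz]

theorem pvDec_snd (g : List (Int × Int)) : ∀ (m : Nat),
    (pvDec g (m : Int)).2 = ((m - Nat.min m g.length : Nat) : Int) := by
  induction g with
  | nil => intro m; simp [pvDec]
  | cons p t ih =>
    obtain ⟨k, v⟩ := p
    intro m
    cases m with
    | zero => simp [pvDec]
    | succ m =>
      have h1 : (0 : Int) < ((m + 1 : Nat) : Int) := by positivity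
      have h2 : ((m + 1 : Nat) : Int) - 1 = (m : Int) := by push_cast; ring
      simp only [pvDec, if_pos h1, h2, ih m, List.length_cons]
      rw [Nat.cast_inj]
      simp only [Nat.min_def]
      split_ifs <;> omega

theorem pvDec_fst_of_len_le (g : List (Int × Int)) : ∀ (m : Nat), g.length ≤ m →
    (pvDec g (m : Int)).1 = g.map (fun p => (p.1, p.2 - 1)) := by
  induction g with
  | nil => intro m _; simp [pvDec]
  | cons p t ih =>
    obtain ⟨k, v⟩ := p
    intro m hm
    simp only [List.length_cons] at hm
    have h1 : (0 : Int) < (m : Int) := by exact_mod_cast Nat.pos_of_ne_zero (by omega)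
    have h2 : (m : Int) - 1 = ((m - 1 : Nat) : Int) := by omega
    simp only [pvDec, if_pos h1, h2, ih (m - 1) (by omega), List.map_cons]

theorem pv_uniform : ∀ (n : Nat) (a c : Int) (r : Nat), r ≤ n →
    (pvDec ((PySem.List.pyRange a (a + (n : Int)) 1).map (fun i => (i, c))) ((r : Nat) : Int)).1 =
      (PySem.List.pyRange a (a + (n : Int)) 1).map
        (fun i => (i, if i < a + (r : Int) then c - 1 else c)) := by
  intro n
  induction n with
  | zero =>
    intro a c r hr
    simp only [Nat.cast_zero, add_zero, PySem.List.pyRange_one_eq_nil (le_refl a), List.map_nil]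
    rfl
  | succ n ih =>
    intro a c r hr
    have hcons : PySem.List.pyRange a (a + ((n + 1 : Nat) : Int)) 1
        = a :: PySem.List.pyRange (a + 1) ((a + 1) + (n : Int)) 1 := by
      rw [PySem.List.pyRange_one_cons (by push_cast; omega)]
      congr 1
      push_cast
      ring_nf
    rw [hcons]
    cases r with
    | zero =>
      simp only [Nat.cast_zero, List.map_cons]
      rw [pvDec_nonpos _ _ (by norm_num)]
      dsimp only
      congr 1
      · rw [if_neg (by omega)]
      apply List.map_congr_left
      intro i hi
      rw [PySem.List.mem_pyRange_one] at hi
      rw [if_neg (by omega)]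
    | succ r =>
      have h1 : (0 : Int) < ((r + 1 : Nat) : Int) := by positivity
      have h2 : ((r + 1 : Nat) : Int) - 1 = ((r : Nat) : Int) := by push_cast; ring
      simp only [List.map_cons, pvDec, if_pos h1, h2]
      rw [ih (a + 1) c r (by omega)]
      congr 1
      · rw [if_pos (by push_cast; omega)]
      · apply List.map_congr_left
        intro i hi
        rw [PySem.List.mem_pyRange_one] at hi
        by_cases hir : i < a + 1 + (r : Int)
        · rw [if_pos hir, if_pos (by push_cast; omega)]
        · rw [if_neg hir, if_neg (by push_cast; omega)]

theorem pvWhile_spec : ∀ (m : Nat) (g : List (Int × Int)), g ≠ [] → (g.map Prod.fst).Nodup →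
    pvWhile g (m : Int) =
      (pvDec (g.map (fun p => (p.1, p.2 - ((m / g.length : Nat) : Int)))) ((m % g.length : Nat) : Int)).1 := by
  intro m
  induction m using Nat.strong_induction_on with
  | _ m IH =>
    intro g hne hnd
    have hn1 : 1 ≤ g.length := List.length_pos_iff.mpr hne
    rcases Nat.eq_zero_or_pos m with hm0 | hm1
    · subst hm0
      rw [pvWhile, dif_neg (by norm_num)]
      rw [Nat.zero_div, Nat.zero_mod, Nat.cast_zero]
      rw [pvDec_nonpos _ _ (by norm_num)]
      simp
    · -- m ≥ 1: the while condition holds, one pass runs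
      have hmpos : (0 : Int) < (m : Int) := by exact_mod_cast hm1
      have hpass : pvPass g ((m : Nat) : Int) = pvDec g ((m : Nat) : Int) := pvPass_eq g _ hnd
      have hsnd : (pvDec g ((m : Nat) : Int)).2 = ((m - Nat.min m g.length : Nat) : Int) :=
        pvDec_snd g m
      have hmu1 : 1 ≤ Nat.min m g.length := Nat.le_min.mpr ⟨hm1, hn1⟩
      have hmu2 : Nat.min m g.length ≤ m := Nat.min_le_left m g.length
      have hsub : m - Nat.min m g.length < m := by omega
      have hdec : (pvPass g ((m : Nat) : Int)).2.toNat < (((m : Nat) : Int)).toNat := by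
        rw [hpass, hsnd]
        simp only [Int.toNat_natCast]
        exact hsub
      rw [pvWhile, dif_pos hmpos]
      simp only [hpass]
      rw [dif_pos (by rw [hsnd]; simp only [Int.toNat_natCast]; exact hsub), hsnd]
      rcases Nat.lt_or_ge m g.length with hlt | hge
      · -- fewer steps than groups: the pass stops mid-list and the loop ends
        have hmin : Nat.min m g.length = m := Nat.min_eq_left (le_of_lt hlt)
        rw [hmin, Nat.sub_self, Nat.cast_zero, pvWhile, dif_neg (by norm_num)]
        rw [Nat.div_eq_of_lt hlt, Nat.mod_eq_of_lt hlt, Nat.cast_zero]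
        simp
      · -- a full pass: every value drops by 1, recurse on m - length
        have hmin : Nat.min m g.length = g.length := Nat.min_eq_right hge
        rw [hmin, pvDec_fst_of_len_le g m hge]
        have hIH := IH (m - g.length) (by omega) (g.map (fun p => (p.1, p.2 - 1)))
          (by simp [List.map_eq_nil_iff, hne]) (by simpa [List.map_map, Function.comp] using hnd)
        simp only [List.length_map] at hIH
        have hdiv : (m - g.length) / g.length + 1 = m / g.length := by
          rw [← Nat.add_div_right _ hn1, Nat.sub_add_cancel hge]
        have hmod : (m - g.length) % g.length = m % g.length :=
          Eq.symm (Nat.mod_eq_sub_mod hge)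
        rw [hIH, List.map_map, hmod]
        have hfun : ((fun p : Int × Int => (p.1, p.2 - (((m - g.length) / g.length : Nat) : Int)))
              ∘ (fun p : Int × Int => (p.1, p.2 - 1)))
            = (fun p : Int × Int => (p.1, p.2 - ((m / g.length : Nat) : Int))) := by
          funext p
          simp only [Function.comp_apply]
          congr 1
          omega
        rw [hfun]

theorem get_raspredelenie_groups_spec : Claim_equal_get_raspredelenie_groups := by
  intro mn mx it _ hpre
  unfold Spec_get_raspredelenie_groups get_raspredelenie_groups get_raspredelenie_groups_alt
  obtain ⟨hmx0, hpre2⟩ := hpre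
  by_cases hsp : mn = mx ∧ it ≤ mx
  · simp only [if_pos hsp]
  · simp only [if_neg hsp]
    set d := PySem.Int.floordiv it mx with hd
    set x := d + 1 with hx
    set z := mx * x - it with hz
    -- the build loop produces the dict [(1, mx), …, (x, mx)]
    have hbuild : (PySem.List.pyRange 1 (x + 1) 1).foldl (fun g i => pvIns g i mx) []
        = (PySem.List.pyRange 1 (x + 1) 1).map (fun i => (i, mx)) := by
      rw [pv_build _ _ [] (by simp) (PySem.List.nodup_pyRange_one 1 (x + 1))]
      simp
    rw [hbuild]
    have hzeq : z = mx - PySem.Int.mod it mx := by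
      have h := PySem.Int.floordiv_mul_add_mod it mx
      rw [hz, hx, hd]
      linear_combination h

    by_cases hneg : mx < 0
    · -- negative max: z < 0, the while loop never runs; B takes its z ≤ 0 branch
      have hmb := PySem.Int.mod_neg_bounds it (b := mx) hneg
      have hzneg : z < 0 := by omega
      rw [pvWhile, dif_neg (by omega), if_pos (le_of_lt hzneg)]
    · -- positive max (and itogo ≥ 0): 0 < z ≤ mx, x ≥ 1; closed-form distribution
      have hmxpos : 0 < mx := by omega
      have hit : 0 ≤ it := by
        rcases hpre2 with h | h | h
        · exact h
        · omega
        · exact absurd h hsp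
      have hmnn := PySem.Int.mod_nonneg it (b := mx) hmxpos
      have hmlt := PySem.Int.mod_lt it (b := mx) hmxpos
      have hzpos : 0 < z := by omega
      have hdpos : 0 ≤ d := by
        rw [hd, PySem.Int.le_floordiv_iff_mul_le hmxpos]
        omega
      have hxpos : 0 < x := by omega
      -- Nat versions of x and z
      obtain ⟨n, hn⟩ : ∃ n : Nat, (n : Int) = x := ⟨x.toNat, Int.toNat_of_nonneg (le_of_lt hxpos)⟩
      obtain ⟨m, hm⟩ : ∃ m : Nat, (m : Int) = z := ⟨z.toNat, Int.toNat_of_nonneg (le_of_lt hzpos)⟩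
      have hn1 : 1 ≤ n := by omega
      have hlen : (PySem.List.pyRange 1 (x + 1) 1).length = n := by
        rw [PySem.List.length_pyRange_one]
        omega
      have hne : (PySem.List.pyRange 1 (x + 1) 1).map (fun i => (i, mx)) ≠ [] := by
        intro hc
        have := congrArg List.length hc
        simp [hlen] at this
        omega
      have hnd : (((PySem.List.pyRange 1 (x + 1) 1).map (fun i => (i, mx))).map Prod.fst).Nodup := by
        rw [List.map_map, show (Prod.fst ∘ fun i : Int => (i, mx)) = id from rfl, List.map_id]
        exact PySem.List.nodup_pyRange_one 1 (x + 1)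
      rw [← hm, pvWhile_spec m _ hne hnd]
      rw [if_neg (by omega)]
      simp only [List.length_map, hlen, List.map_map]
      have hq : PySem.Int.floordiv ((m : Nat) : Int) x = ((m / n : Nat) : Int) := by
        rw [← hn]
        exact_mod_cast PySem.Int.floordiv_natCast m n
      have hr : PySem.Int.mod ((m : Nat) : Int) x = ((m % n : Nat) : Int) := by
        rw [← hn]
        exact_mod_cast PySem.Int.mod_natCast m n
      rw [hq, hr]
      have hcomp : ((fun p : Int × Int => (p.1, p.2 - ((m / n : Nat) : Int)))
            ∘ (fun i : Int => (i, mx)))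
          = (fun i : Int => (i, mx - ((m / n : Nat) : Int))) := by
        funext i
        rfl
      rw [hcomp]
      have hx1n : x + 1 = 1 + (n : Int) := by omega
      rw [hx1n, pv_uniform n 1 (mx - ((m / n : Nat) : Int)) (m % n) (le_of_lt (Nat.mod_lt m (by omega)))]
      apply List.map_congr_left
      intro i hi
      rw [PySem.List.mem_pyRange_one] at hi
      have hrn : ((m % n : Nat) : Int) < (n : Int) := by exact_mod_cast Nat.mod_lt m (by omega)
      by_cases hir : i ≤ ((m % n : Nat) : Int)
      · rw [if_pos (by omega), if_pos hir]
      · rw [if_neg (by omega), if_neg hir]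
        ring
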